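-- pv_equiv track=rewrite | github.com/jlpalaciosb/alexico | automata.py | conv_rangos
-- ===== SOURCE A (Python) =====
-- def conv_rangos(regex):
--     ret = ''
--     i = 0
--     while i < len(regex):
--         ch = regex[i]
--         if ch == '[':
--             ch1 = regex[i+1]
--             ch2 = regex[i+3]
--             ret += '('
--             ret += ch1
--             for j in range(ord(ch1) + 1, ord(ch2) + 1):
--                 ret += '|'+chr(j)
--             ret += ')'
--             i += 5
--         else:
--             ret += ch
--             i += 1
--     return ret
-- ===== SOURCE B (Python) =====
-- def conv_rangos(regex):
--     parts = []
--     i = 0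
--     while True:
--         j = regex.find('[', i)
--         if j == -1:
--             parts.append(regex[i:])
--             break
--         parts.append(regex[i:j])
--         ch1 = regex[j + 1]
--         ch2 = regex[j + 3]
--         parts.append('(' + ch1
--                      + ''.join('|' + chr(k) for k in range(ord(ch1) + 1, ord(ch2) + 1))
--                      + ')')
--         i = j + 5
--     return ''.join(parts)
-- ===== Notes on version B (the rewrite author's own statement) =====
-- stated objective: faster
-- what changed: Replaces the per-character index scan with a chunked find-and-slice traversal: each iteration jumps straight to the next '[' with str.find, copies the literal stretch in one slice, emits the expanded alternation chunk, skips 5, and the output is assembled by one final str.join instead of repeated string +=.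
import Mathlib
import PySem

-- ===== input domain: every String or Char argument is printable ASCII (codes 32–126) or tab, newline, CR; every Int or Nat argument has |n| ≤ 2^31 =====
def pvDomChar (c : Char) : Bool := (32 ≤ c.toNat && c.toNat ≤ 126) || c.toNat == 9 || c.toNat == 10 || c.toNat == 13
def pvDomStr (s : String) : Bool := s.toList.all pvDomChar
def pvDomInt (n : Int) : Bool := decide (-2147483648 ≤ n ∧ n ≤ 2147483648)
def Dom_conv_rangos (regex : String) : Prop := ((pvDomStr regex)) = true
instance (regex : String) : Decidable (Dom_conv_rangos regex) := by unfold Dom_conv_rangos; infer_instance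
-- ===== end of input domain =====

-- B replaces A's per-character index scan by a find-and-slice chunked traversal joined at the end; same output and same IndexError condition.

-- ===== PORT A =====
-- A's while loop: state = accumulated output `ret` + the unscanned suffix of the input
-- (suffix at index i); regex[i+1]/regex[i+3] out of range = IndexError = none.
def pvA_loop (ret : List Char) (cs : List Char) : Option (List Char) :=
  match cs with
  | [] => some ret
  | c :: rest =>
    if c = '[' then
      match rest with
      | c1 :: _x :: c2 :: rest' =>
        let ret1 := ret ++ ['(']
        let ret2 := ret1 ++ [c1]
        let ret3 := (PySem.List.pyRange ((c1.toNat : Int) + 1) ((c2.toNat : Int) + 1) 1).foldl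
          (fun acc j => acc ++ ['|', Char.ofNat j.toNat]) ret2
        pvA_loop (ret3 ++ [')']) (rest'.drop 1)
      | _ => none
    else pvA_loop (ret ++ [c]) rest
termination_by cs.length
decreasing_by
  · simp; omega
  · simp

def conv_rangos (regex : String) : String :=
  String.ofList ((pvA_loop [] regex.toList).getD [])

-- ===== PORT B =====
-- B's loop: regex.find('[', i) = the takeWhile/dropWhile split of the suffix; the literal
-- stretch is kept as one slice chunk, the bracket expands to one chunk ('(' + ch1 + joined
-- '|'+chr(k) pieces + ')'), recurse past the 5 consumed characters; final ''.join = flatten.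
def pvB_loop (cs : List Char) : Option (List (List Char)) :=
  match h : cs.dropWhile (fun c => !(c = '[')) with
  | [] => some [cs.takeWhile (fun c => !(c = '['))]
  | _ :: c1 :: _x :: c2 :: rest' =>
    (pvB_loop (rest'.drop 1)).map (fun ps =>
      cs.takeWhile (fun c => !(c = '[')) ::
        ('(' :: c1 ::
          ((PySem.List.pyRange ((c1.toNat : Int) + 1) ((c2.toNat : Int) + 1) 1).map
            (fun j => ['|', Char.ofNat j.toNat])).flatten ++ [')']) :: ps)
  | _ => none
termination_by cs.length
decreasing_by
  have h0 := List.takeWhile_append_dropWhile (p := fun c => !(c = '[')) (l := cs)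
  rw [h] at h0
  have h1 := congrArg List.length h0
  simp at h1
  simp
  omega

def conv_rangos_alt (regex : String) : String :=
  String.ofList (((pvB_loop regex.toList).map List.flatten).getD [])

-- ===== PRECONDITION & SPEC =====
-- A (and B) raise IndexError exactly when the string is NOT a sequence of tokens, where a
-- token is a literal character other than '[' or a '['-block of 5 characters (3 after the
-- '[' suffice at the very end, since the scan then steps past the end).  pvPreOk checks this
-- shape with one fold: skip = characters left in the current block, req = how many of them
-- must still be present; well-formed iff no required character is missing when the string ends.
def pvPreOk (cs : List Char) : Bool :=
  (cs.foldl (fun st c =>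
    if st.1 = 0 then (if c = '[' then ((4 : Nat), (3 : Nat)) else (0, 0))
    else (st.1 - 1, st.2 - 1)) ((0 : Nat), (0 : Nat))).2 = 0

def Pre_conv_rangos (regex : String) : Prop := pvPreOk regex.toList = true
instance (regex : String) : Decidable (Pre_conv_rangos regex) := by unfold Pre_conv_rangos; infer_instance

def pvWitness_conv_rangos : String := "a[a-c]b.[0-2]"

def Spec_conv_rangos (regex : String) (out : String) : Prop := out = conv_rangos_alt regex
instance (regex : String) (out : String) : Decidable (Spec_conv_rangos regex out) := by unfold Spec_conv_rangos; infer_instance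

-- ===== CLAIM (what is proved, stated in full; the proofs are below) =====
def Claim_equal_conv_rangos : Prop := ∀ (regex : String), Dom_conv_rangos regex → Pre_conv_rangos regex → Spec_conv_rangos regex (conv_rangos regex)

-- ===== LEMMAS AND PROOFS =====

-- the head of a non-empty dropWhile fails the predicate
lemma pv_dropWhile_head_false {α : Type} (p : α → Bool) :
    ∀ (l : List α) {b : α} {t : List α}, l.dropWhile p = b :: t → p b = false := by
  intro l
  induction l with
  | nil => intro b t h; simp [List.dropWhile] at h
  | cons a l ih =>
    intro b t h
    by_cases hp : p a
    · rw [List.dropWhile_cons_of_pos hp] at h; exact ih h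
    · rw [List.dropWhile_cons_of_neg hp] at h
      cases h
      simpa using hp

-- A's scan walks a bracket-free prefix character by character, appending it to ret
lemma pvA_skip (pre : List Char) (h : ∀ c ∈ pre, c ≠ '[') :
    ∀ (ret tl : List Char), pvA_loop ret (pre ++ tl) = pvA_loop (ret ++ pre) tl := by
  induction pre with
  | nil => intro ret tl; simp
  | cons c pre' ih =>
    intro ret tl
    have hc : c ≠ '[' := h c (List.mem_cons_self ..)
    rw [List.cons_append, pvA_loop.eq_def]
    simp only [if_neg hc]
    rw [ih (fun x hx => h x (List.mem_cons_of_mem _ hx))]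
    simp

-- core equivalence: A's accumulator loop computes B's chunk list, flattened
lemma pv_main : ∀ (n : Nat) (cs : List Char), cs.length ≤ n → ∀ ret : List Char,
    pvA_loop ret cs = (pvB_loop cs).map (fun ps => ret ++ ps.flatten) := by
  intro n
  induction n with
  | zero =>
    intro cs hn ret
    have : cs = [] := List.eq_nil_of_length_eq_zero (Nat.le_zero.mp hn)
    subst this
    simp [pvA_loop, pvB_loop]
  | succ n ih =>
    intro cs hn ret
    have hsplit := List.takeWhile_append_dropWhile (p := fun c => !(c = '[')) (l := cs)
    have hpre : ∀ c ∈ cs.takeWhile (fun c => !(c = '[')), c ≠ '[' := by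
      intro c hc
      have := List.mem_takeWhile_imp hc
      simpa using this
    rcases hd : cs.dropWhile (fun c => !(c = '[')) with _ | ⟨b, tl⟩
    · -- no '[' remains: cs is one literal chunk
      rw [hd, List.append_nil] at hsplit
      have hskip := pvA_skip _ hpre ret []
      rw [List.append_nil] at hskip
      rw [pvB_loop.eq_def, hd]
      conv_lhs => rw [← hsplit]
      rw [hskip]
      simp [pvA_loop]
    · have hb : b = '[' := by
        have := pv_dropWhile_head_false _ cs hd
        simpa using this
      subst hb
      rw [hd] at hsplit
      rcases tl with _ | ⟨c1, tl⟩ <;> [skip; rcases tl with _ | ⟨x, tl⟩] <;>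
        [skip; skip; rcases tl with _ | ⟨c2, rest'⟩]
      -- the three truncated-bracket shapes: both sides are none
      · rw [pvB_loop.eq_def, hd]
        conv_lhs => rw [← hsplit]
        rw [pvA_skip _ hpre ret]
        simp [pvA_loop]
      · rw [pvB_loop.eq_def, hd]
        conv_lhs => rw [← hsplit]
        rw [pvA_skip _ hpre ret]
        simp [pvA_loop]
      · rw [pvB_loop.eq_def, hd]
        conv_lhs => rw [← hsplit]
        rw [pvA_skip _ hpre ret]
        simp [pvA_loop]
      -- the well-formed bracket shape
      · have hlen := congrArg List.length hsplit
        simp only [List.length_append, List.length_cons] at hlen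
        have hrec : (rest'.drop 1).length ≤ n := by
          have := List.length_drop (l := rest') (i := 1)
          omega
        rw [pvB_loop.eq_def, hd]
        conv_lhs => rw [← hsplit]
        rw [pvA_skip _ hpre ret]
        rw [pvA_loop.eq_def]
        simp only [reduceIte]
        rw [ih _ hrec]
        cases hB : pvB_loop (rest'.drop 1) <;>
          simp [List.append_assoc]

-- ===== VERDICT (by name: the statement is the Claim_ definition above) =====
theorem conv_rangos_spec : Claim_equal_conv_rangos := by
  intro regex _ _
  unfold Spec_conv_rangos conv_rangos conv_rangos_alt
  rw [pv_main regex.toList.length _ le_rfl]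
  cases pvB_loop regex.toList <;> simp
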